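-- pv_equiv track=rewrite | github.com/vultor33/StereoisomerIdentifier | code/python/FormulaHandling.py | _calculateNewMapBetweenAtomsAndTypes
-- ===== SOURCE A (Python) =====
-- from collections import Counter
-- import operator
--
-- def _calculateNewMapBetweenAtomsAndTypes(rank):
-- 	newMap = {}
-- 	sortedRank = list(rank)
-- 	sortedRank.sort()
-- 	rankCounting = Counter(sortedRank)
-- 	oldRankCounting = dict(rankCounting)
-- 	for i in range(len(oldRankCounting)):
-- 		maxKey = max(oldRankCounting.items(), key=operator.itemgetter(1))[0]
-- 		newMap[maxKey] = i
-- 		del oldRankCounting[maxKey]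
--
-- 	return newMap
-- ===== SOURCE B (Python) =====
-- from collections import Counter
--
-- def _calculateNewMapBetweenAtomsAndTypes(rank):
-- 	if not rank:
-- 		return {}
-- 	counts = Counter(rank)
-- 	buckets = {}
-- 	for v in sorted(counts):
-- 		buckets.setdefault(counts[v], []).append(v)
-- 	newMap = {}
-- 	idx = 0
-- 	for f in range(max(counts.values()), 0, -1):
-- 		for v in buckets.get(f, []):
-- 			newMap[v] = idx
-- 			idx += 1
-- 	return newMap
-- ===== Notes on version B (the rewrite author's own statement) =====
-- stated objective: faster
-- what changed: Replaces the repeated max-scan selection over the shrinking counter dict (a full scan plus a dict rebuild via del per distinct value, quadratic in the number of distinct values) with a single counting-sort pass: values are bucketed by frequency in ascending value order and indices are assigned walking frequencies from the maximum count down to 1.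
import Mathlib
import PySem

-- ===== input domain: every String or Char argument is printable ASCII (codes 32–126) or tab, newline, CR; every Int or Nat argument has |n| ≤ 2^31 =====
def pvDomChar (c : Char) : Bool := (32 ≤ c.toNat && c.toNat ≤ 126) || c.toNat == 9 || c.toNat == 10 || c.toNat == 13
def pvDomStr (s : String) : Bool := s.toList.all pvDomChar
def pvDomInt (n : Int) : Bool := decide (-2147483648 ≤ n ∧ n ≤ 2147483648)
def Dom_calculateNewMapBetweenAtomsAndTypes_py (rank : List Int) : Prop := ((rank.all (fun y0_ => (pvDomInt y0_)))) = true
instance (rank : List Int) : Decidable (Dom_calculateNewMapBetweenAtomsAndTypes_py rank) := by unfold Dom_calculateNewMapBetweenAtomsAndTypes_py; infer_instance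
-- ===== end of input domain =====

-- B replaces A's repeated max-scan selection over the shrinking counter dict with a single
-- counting-sort traversal (buckets indexed by frequency, walked from the largest frequency down);
-- objective: faster (a timing run measured B faster at every generated size).

-- ===== PORT A =====
def calculateNewMapBetweenAtomsAndTypes_py (rank : List Int) : List (Int × Int) :=
  let newMap : PySem.Dict Int Int := PySem.Dict.empty
  let sortedRank := PySem.List.sorted rank (fun x => x) false
  let rankCounting := PySem.Dict.counter sortedRank
  let oldRankCounting := rankCounting
  let res := (PySem.List.pyRange 0 oldRankCounting.size 1).foldl
    (fun (st : PySem.Dict Int Int × PySem.Dict Int Int) i =>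
      -- max(old.items(), key=itemgetter(1))[0]; the dict is never empty inside the loop,
      -- so the 'none' branch (Python's ValueError on an empty max) is unreachable
      match PySem.List.max? st.2.items (fun p => p.2) with
      | some m => (st.1.insert m.1 i, st.2.erase m.1)
      | none => st)
    (newMap, oldRankCounting)
  res.1.items

-- ===== PORT B =====
def calculateNewMapBetweenAtomsAndTypes_py_alt (rank : List Int) : List (Int × Int) :=
  if rank = [] then [] else
  let counts := PySem.Dict.counter rank
  let buckets := (PySem.List.sorted counts.keys (fun x => x) false).foldl
      (fun (b : PySem.Dict Int (List Int)) v => b.modify (counts.getD v 0) [] (· ++ [v]))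
      PySem.Dict.empty
  -- max(counts.values()); counts is nonempty here, so the 'none' branch is unreachable
  let maxc := match PySem.List.max? counts.values (fun x => x) with
              | some m => m
              | none => 0
  let res := (PySem.List.pyRange maxc 0 (-1)).foldl
    (fun (st : PySem.Dict Int Int × Int) f =>
      (buckets.getD f []).foldl (fun st v => (st.1.insert v st.2, st.2 + 1)) st)
    (PySem.Dict.empty, 0)
  res.1.items

-- ===== PRECONDITION & SPEC =====
def Spec_calculateNewMapBetweenAtomsAndTypes_py (rank : List Int) (out : List (Int × Int)) : Prop := out = calculateNewMapBetweenAtomsAndTypes_py_alt rank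
instance (rank : List Int) (out : List (Int × Int)) : Decidable (Spec_calculateNewMapBetweenAtomsAndTypes_py rank out) := by unfold Spec_calculateNewMapBetweenAtomsAndTypes_py; infer_instance

-- ===== CLAIM (what is proved, stated in full; the proofs are below) =====
def Claim_equal_calculateNewMapBetweenAtomsAndTypes_py : Prop := ∀ (rank : List Int), Dom_calculateNewMapBetweenAtomsAndTypes_py rank → Spec_calculateNewMapBetweenAtomsAndTypes_py rank (calculateNewMapBetweenAtomsAndTypes_py rank)

-- ===== LEMMAS AND PROOFS =====

-- `pvKey` encodes the order "larger count first, ties by smaller value first" as a single Int,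
-- valid while |first component| ≤ 2^31 (guaranteed by Dom_).
def pvKey (p : Int × Int) : Int := -p.2 * 8589934592 + p.1

-- tag a list of keys with consecutive indices starting at i
def pvTag : List Int → Int → List (Int × Int)
  | [], _ => []
  | k :: t, i => (k, i) :: pvTag t (i + 1)

-- the selection order A's loop extracts (first max-by-count, then recurse on the rest)
def pvSel : Nat → List (Int × Int) → List (Int × Int)
  | 0, _ => []
  | n + 1, L =>
    match PySem.List.max? L (fun p => p.2) with
    | some m => m :: pvSel n (L.filter (fun p => !(p.1 == m.1)))
    | none => []

-- the bucket order B's loop emits (count n+1 bucket, then counts n..1)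
def pvBuck : Nat → List (Int × Int) → List (Int × Int)
  | 0, _ => []
  | n + 1, L => L.filter (fun p => p.2 == ((n : Int) + 1)) ++ pvBuck n L


theorem pv_max_cons (t : List (Int × Int)) (x : Int × Int) :
    PySem.List.max? (x :: t) (fun p => p.2)
      = some (t.foldl (fun m p => if m.2 < p.2 then p else m) x) := by
  show List.foldl _ _ _ = _
  simp only [List.foldl]
  induction t generalizing x with
  | nil => rfl
  | cons y t ih =>
    simp only [List.foldl]
    by_cases h : x.2 < y.2 <;> simp only [h, if_pos, if_neg, ite_true, ite_false] <;> exact ih _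

theorem pv_foldlMax_spec (t : List (Int × Int)) (x : Int × Int)
    (hp : (x :: t).Pairwise (fun p q => p.1 < q.1)) :
    (t.foldl (fun m p => if m.2 < p.2 then p else m) x) ∈ x :: t ∧
    ((t.foldl (fun m p => if m.2 < p.2 then p else m) x) = x ∨
      x.2 < (t.foldl (fun m p => if m.2 < p.2 then p else m) x).2) ∧
    ∀ p ∈ x :: t, p.2 ≤ (t.foldl (fun m p => if m.2 < p.2 then p else m) x).2 ∧
      (p.2 = (t.foldl (fun m p => if m.2 < p.2 then p else m) x).2 →
        (t.foldl (fun m p => if m.2 < p.2 then p else m) x).1 ≤ p.1) := by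
  induction t generalizing x with
  | nil => simp
  | cons y t ih =>
    rcases List.pairwise_cons.1 hp with ⟨hx, hp'⟩
    rcases List.pairwise_cons.1 hp' with ⟨hy, hpt⟩
    simp only [List.foldl]
    by_cases h : x.2 < y.2
    · rw [if_pos h]
      obtain ⟨hm, hor, hall⟩ := ih y hp'
      refine ⟨List.mem_cons_of_mem _ hm, ?_, ?_⟩
      · right
        rcases hor with h1 | h1
        · rw [h1]; exact h
        · exact lt_trans h h1
      · intro p hpmem
        rcases List.mem_cons.1 hpmem with rfl | hpmem'
        · have h2 := (hall y List.mem_cons_self).1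
          exact ⟨by omega, by omega⟩
        · exact hall p hpmem'
    · rw [if_neg h]
      have hp2 : (x :: t).Pairwise (fun p q => p.1 < q.1) :=
        List.pairwise_cons.2 ⟨fun q hq => hx q (List.mem_cons_of_mem _ hq), hpt⟩
      obtain ⟨hm, hor, hall⟩ := ih x hp2
      refine ⟨?_, hor, ?_⟩
      · rcases List.mem_cons.1 hm with h1 | h1
        · rw [h1]; exact List.mem_cons_self
        · exact List.mem_cons_of_mem _ (List.mem_cons_of_mem _ h1)
      · intro p hpmem
        rcases List.mem_cons.1 hpmem with rfl | hpmem'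
        · exact hall p List.mem_cons_self
        · rcases List.mem_cons.1 hpmem' with rfl | hpmem''
          · have hx2 := (hall x List.mem_cons_self).1
            refine ⟨by omega, fun heq => ?_⟩
            rcases hor with h1 | h1
            · rw [h1]; exact le_of_lt (hx p List.mem_cons_self)
            · omega
          · exact hall p (List.mem_cons_of_mem _ hpmem'')

theorem pv_max_first {L : List (Int × Int)} {m : Int × Int}
    (hL : L.Pairwise (fun p q => p.1 < q.1))
    (h : PySem.List.max? L (fun p => p.2) = some m) :
    m ∈ L ∧ ∀ p ∈ L, p.2 ≤ m.2 ∧ (p.2 = m.2 → m.1 ≤ p.1) := by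
  cases L with
  | nil => simp [PySem.List.max?] at h
  | cons x t =>
    rw [pv_max_cons] at h
    obtain ⟨hm, _, hall⟩ := pv_foldlMax_spec t x hL
    cases h
    exact ⟨hm, hall⟩

theorem pv_perm_filter_self {L : List (Int × Int)} {m : Int × Int}
    (hL : L.Pairwise (fun p q => p.1 < q.1)) (hm : m ∈ L) :
    L.Perm (m :: L.filter (fun p => !(p.1 == m.1))) := by
  induction L with
  | nil => cases hm
  | cons x t ih =>
    rcases List.pairwise_cons.1 hL with ⟨hx, ht⟩
    rcases List.mem_cons.1 hm with rfl | hm'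
    · have : t.filter (fun p => !(p.1 == m.1)) = t := by
        apply List.filter_eq_self.2
        intro p hp
        have := hx p hp
        simp only [Bool.not_eq_eq_eq_not, Bool.not_true, beq_eq_false_iff_ne, ne_eq]
        omega
      simp only [List.filter_cons, beq_self_eq_true, Bool.not_true, if_neg]
      simp [this]
    · have hxm : x.1 ≠ m.1 := by have := hx m hm'; omega
      have : (x :: t).filter (fun p => !(p.1 == m.1)) = x :: t.filter (fun p => !(p.1 == m.1)) := by
        simp [List.filter_cons, hxm]
      rw [this]
      exact ((ih ht hm').cons x).trans (List.Perm.swap _ _ _)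

theorem pvSel_spec (n : Nat) (L : List (Int × Int)) (h : L.length = n)
    (hL : L.Pairwise (fun p q => p.1 < q.1))
    (hb : ∀ p ∈ L, -2147483648 ≤ p.1 ∧ p.1 ≤ 2147483648) :
    (pvSel n L).Perm L ∧ (pvSel n L).Pairwise (fun p q => pvKey p < pvKey q) := by
  induction n generalizing L with
  | zero =>
    have : L = [] := List.length_eq_zero_iff.1 h
    subst this; simp [pvSel]
  | succ n ih =>
    have hne : L ≠ [] := by intro hnil; rw [hnil] at h; simp at h
    obtain ⟨m, hmax⟩ : ∃ m, PySem.List.max? L (fun p => p.2) = some m := by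
      cases hx : PySem.List.max? L (fun p => p.2) with
      | none => exact absurd ((PySem.List.max?_eq_none_iff _ _).1 hx) hne
      | some m => exact ⟨m, rfl⟩
    obtain ⟨hmem, hall⟩ := pv_max_first hL hmax
    have hperm := pv_perm_filter_self hL hmem
    set L' := L.filter (fun p => !(p.1 == m.1)) with hL'
    have hlen : L'.length = n := by
      have := hperm.length_eq
      simp only [List.length_cons] at this
      omega
    have hLp : L'.Pairwise (fun p q => p.1 < q.1) := hL.filter _
    have hbp : ∀ p ∈ L', -2147483648 ≤ p.1 ∧ p.1 ≤ 2147483648 :=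
      fun p hp => hb p (List.mem_of_mem_filter hp)
    obtain ⟨ihperm, ihpw⟩ := ih L' hlen hLp hbp
    simp only [pvSel, hmax]
    constructor
    · exact ((ihperm.cons m).trans hperm.symm)
    · refine List.pairwise_cons.2 ⟨?_, ihpw⟩
      intro q hq
      have hqL' : q ∈ L' := ihperm.mem_iff.1 hq
      have hqL : q ∈ L := List.mem_of_mem_filter hqL'
      have hqne : ¬(q.1 == m.1) = true := by
        have := List.of_mem_filter hqL'
        simpa using this
      have hqne' : q.1 ≠ m.1 := by simpa using hqne
      obtain ⟨hle, heq⟩ := hall q hqL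
      obtain ⟨hb1, hb2⟩ := hb q hqL
      obtain ⟨hb3, hb4⟩ := hb m hmem
      simp only [pvKey]
      rcases lt_or_eq_of_le hle with hlt | heq2
      · nlinarith
      · have := heq heq2
        have : m.1 < q.1 := lt_of_le_of_ne this (fun e => hqne' e.symm)
        omega

theorem pv_mem_pvBuck {n : Nat} {L : List (Int × Int)} {p : Int × Int}
    (h : p ∈ pvBuck n L) : p ∈ L ∧ p.2 ≤ (n : Int) := by
  induction n with
  | zero => simp [pvBuck] at h
  | succ n ih =>
    simp only [pvBuck, List.mem_append] at h
    rcases h with h | h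
    · have h2 := List.of_mem_filter h
      have h1 := List.mem_of_mem_filter h
      simp only [beq_iff_eq] at h2
      exact ⟨h1, by push_cast; omega⟩
    · obtain ⟨h1, h2⟩ := ih h
      exact ⟨h1, by push_cast at h2 ⊢; omega⟩

theorem pv_filter_partition_perm (p q : (Int × Int) → Bool) (L : List (Int × Int))
    (hd : ∀ x ∈ L, ¬(p x = true ∧ q x = true)) :
    (L.filter p ++ L.filter q).Perm (L.filter (fun x => p x || q x)) := by
  induction L with
  | nil => simp
  | cons x t ih =>
    have iht := ih (fun y hy => hd y (List.mem_cons_of_mem _ hy))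
    by_cases hp : p x = true
    · have hq : ¬ q x = true := fun hq => hd x List.mem_cons_self ⟨hp, hq⟩
      simp only [List.filter_cons, hp, hq, if_pos, if_neg, Bool.or_eq_true, true_or, if_true]
      simpa using iht.cons x
    · by_cases hq : q x = true
      · simp only [List.filter_cons, hp, hq, Bool.or_eq_true, or_true, if_false, if_true,
          Bool.false_eq_true, ite_false, ite_true]
        exact (List.perm_middle.trans (iht.cons x))
      · simp only [List.filter_cons, hp, hq, Bool.or_eq_true, if_neg]
        simpa using iht

theorem pvBuck_perm (n : Nat) (L : List (Int × Int))
    (h : ∀ p ∈ L, 1 ≤ p.2 ∧ p.2 ≤ (n : Int)) : (pvBuck n L).Perm L := by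
  have key : ∀ (n : Nat) (L : List (Int × Int)),
      (pvBuck n L).Perm (L.filter (fun p => decide (1 ≤ p.2 ∧ p.2 ≤ (n : Int)))) := by
    intro n
    induction n with
    | zero =>
      intro L
      have : L.filter (fun p => decide (1 ≤ p.2 ∧ p.2 ≤ ((0 : Nat) : Int))) = [] := by
        apply List.filter_eq_nil_iff.2
        intro p hp
        simp only [decide_eq_true_eq]
        push_cast; omega
      rw [this]; simp [pvBuck]
    | succ n ih =>
      intro L
      simp only [pvBuck]
      refine ((ih L).append_left (L.filter (fun p => p.2 == ((n : Int) + 1)))).trans ?_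
      refine (pv_filter_partition_perm (fun p => p.2 == ((n : Int) + 1))
        (fun p => decide (1 ≤ p.2 ∧ p.2 ≤ (n : Int))) L ?_).trans (List.Perm.of_eq ?_)
      · intro x hx
        simp only [beq_iff_eq, decide_eq_true_eq]
        rintro ⟨h1, h2⟩
        omega
      · apply List.filter_congr
        intro p hp
        rw [Bool.eq_iff_iff]
        simp only [Bool.or_eq_true, beq_iff_eq, decide_eq_true_eq]
        push_cast
        omega
  refine (key n L).trans ?_
  apply List.Perm.of_eq
  apply List.filter_eq_self.2
  intro p hp
  simpa using h p hp

theorem pvBuck_pairwise (n : Nat) (L : List (Int × Int))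
    (hL : L.Pairwise (fun p q => p.1 < q.1))
    (hb : ∀ p ∈ L, -2147483648 ≤ p.1 ∧ p.1 ≤ 2147483648) :
    (pvBuck n L).Pairwise (fun p q => pvKey p < pvKey q) := by
  induction n with
  | zero => simp [pvBuck]
  | succ n ih =>
    simp only [pvBuck]
    apply List.pairwise_append.2
    refine ⟨?_, ih, ?_⟩
    · -- within the bucket: equal second components, increasing firsts
      have := hL.filter (fun p => p.2 == ((n : Int) + 1))
      refine this.imp_of_mem ?_
      intro p q hp hq hlt
      have hp2 := List.of_mem_filter hp
      have hq2 := List.of_mem_filter hq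
      simp only [beq_iff_eq] at hp2 hq2
      simp only [pvKey]
      omega
    · intro p hp q hq
      have hp2 := List.of_mem_filter hp
      have hpL := List.mem_of_mem_filter hp
      simp only [beq_iff_eq] at hp2
      obtain ⟨hqL, hq2⟩ := pv_mem_pvBuck hq
      obtain ⟨h1, h2⟩ := hb p hpL
      obtain ⟨h3, h4⟩ := hb q hqL
      simp only [pvKey]
      nlinarith

theorem pvSel_eq_pvBuck (n : Nat) (L : List (Int × Int))
    (hL : L.Pairwise (fun p q => p.1 < q.1))
    (hb : ∀ p ∈ L, -2147483648 ≤ p.1 ∧ p.1 ≤ 2147483648)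
    (hc : ∀ p ∈ L, 1 ≤ p.2 ∧ p.2 ≤ (n : Int)) :
    pvSel L.length L = pvBuck n L := by
  obtain ⟨hsp, hspw⟩ := pvSel_spec L.length L rfl hL hb
  have hbp := pvBuck_perm n L hc
  have hbpw := pvBuck_pairwise n L hL hb
  exact List.eq_of_perm_of_sorted
    (fun a b _ _ h1 h2 => by omega)
    hspw hbpw (hsp.trans hbp.symm)


theorem pv_ofList_aux (xs s : List Int) (hs : s.Pairwise (· < ·))
    (hx : xs.Pairwise (· ≤ ·)) (hsx : ∀ a ∈ s, ∀ b ∈ xs, a ≤ b) :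
    (xs.foldl PySem.Set.add s).Pairwise (· < ·) := by
  induction xs generalizing s with
  | nil => exact hs
  | cons y t ih =>
    rcases List.pairwise_cons.1 hx with ⟨hy, ht⟩
    simp only [List.foldl]
    by_cases hmem : y ∈ s
    · refine ih _ ?_ ht ?_
      · simpa [PySem.Set.add, hmem] using hs
      · intro a ha b hb
        simp [PySem.Set.add, hmem] at ha
        exact le_trans (hsx a ha y List.mem_cons_self) (hy b hb)
    · have hadd : PySem.Set.add s y = s ++ [y] := by simp [PySem.Set.add, hmem]
      refine ih _ ?_ ht ?_
      · rw [hadd]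
        apply List.pairwise_append.2
        refine ⟨hs, by simp, ?_⟩
        intro a ha b hb
        simp only [List.mem_singleton] at hb
        have hle := hsx a ha y List.mem_cons_self
        have hne : a ≠ y := fun e => hmem (e ▸ ha)
        omega
      · intro a ha b hb
        rw [hadd] at ha
        rcases List.mem_append.1 ha with h1 | h1
        · exact le_trans (hsx a h1 y List.mem_cons_self) (hy b hb)
        · simp only [List.mem_singleton] at h1
          subst h1
          exact hy b hb

theorem pv_ofList_sorted_lt (xs : List Int) :
    (PySem.Set.ofList (PySem.List.sorted xs (fun x => x) false)).Pairwise (· < ·) :=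
  pv_ofList_aux _ [] (by simp)
    (by simpa using PySem.List.sorted_pairwise xs (fun x => x)) (by simp)

theorem pv_values_eq (rank : List Int) :
    PySem.List.sorted (PySem.Set.ofList rank) (fun x => x) false
      = PySem.Set.ofList (PySem.List.sorted rank (fun x => x) false) := by
  apply PySem.List.sorted_eq_of_perm_of_pairwise_lt
  · apply (List.perm_ext_iff_of_nodup (PySem.Set.nodup_ofList _) (PySem.Set.nodup_ofList _)).2
    intro a
    rw [PySem.Set.mem_ofList, PySem.Set.mem_ofList, PySem.List.mem_sorted]
  · exact pv_ofList_sorted_lt rank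

theorem pvTag_append (ks ks' : List Int) (i : Int) :
    pvTag (ks ++ ks') i = pvTag ks i ++ pvTag ks' (i + ks.length) := by
  induction ks generalizing i with
  | nil => simp [pvTag]
  | cons k t ih =>
    simp only [List.cons_append, pvTag, ih, List.length_cons, List.cons.injEq, true_and]
    congr 2
    push_cast
    ring

theorem pv_foldA (n : Nat) (i0 : Int) (acc old : PySem.Dict Int Int)
    (hd : ∀ p ∈ old.items, acc.contains p.1 = false) :
    (((PySem.List.pyRange i0 (i0 + n) 1).foldl
      (fun (st : PySem.Dict Int Int × PySem.Dict Int Int) i =>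
        match PySem.List.max? st.2.items (fun p => p.2) with
        | some m => (st.1.insert m.1 i, st.2.erase m.1)
        | none => st)
      (acc, old)).1).items
    = acc.items ++ pvTag ((pvSel n old.items).map (·.1)) i0 := by
  induction n generalizing i0 acc old with
  | zero =>
    rw [PySem.List.pyRange_one_eq_nil (by simp)]
    simp [pvSel, pvTag]
  | succ n ih =>
    have hlt : i0 < i0 + ((n : Int) + 1) := by omega
    rw [show (i0 + ((n + 1 : Nat) : Int)) = i0 + ((n : Int) + 1) by push_cast; ring]
    rw [PySem.List.pyRange_one_cons hlt]
    simp only [List.foldl]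
    cases hm : PySem.List.max? old.items (fun p => p.2) with
    | none =>
      have : old.items = [] := (PySem.List.max?_eq_none_iff _ _).1 hm
      rw [show i0 + ((n : Int) + 1) = (i0 + 1) + (n : Int) by ring]
      rw [ih (i0 + 1) acc old hd]
      cases n <;> simp [pvSel, this, PySem.List.max?, pvTag]
    | some m =>
      have hmem : m ∈ old.items := PySem.List.max?_mem hm
      have hfree : acc.contains m.1 = false := hd m hmem
      have herase : (old.erase m.1).items = old.items.filter (fun p => !(p.1 == m.1)) := rfl
      have hd' : ∀ p ∈ (old.erase m.1).items, (acc.insert m.1 i0).contains p.1 = false := by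
        intro p hp
        rw [herase] at hp
        have h1 := List.of_mem_filter hp
        have h2 := List.mem_of_mem_filter hp
        rw [PySem.Dict.contains_insert]
        simp only [Bool.or_eq_false_iff]
        constructor
        · simpa using h1
        · exact hd p h2
      rw [show i0 + ((n : Int) + 1) = (i0 + 1) + (n : Int) by ring]
      rw [ih (i0 + 1) (acc.insert m.1 i0) (old.erase m.1) hd']
      rw [PySem.Dict.items_insert_of_not_contains _ _ hfree]
      simp only [pvSel, hm, List.map_cons, pvTag, herase]
      simp

theorem pv_foldB_contains (ks : List Int) (acc : PySem.Dict Int Int) (i0 : Int) (w : Int)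
    (hw : w ∉ ks) (hacc : acc.contains w = false) :
    ((ks.foldl (fun (st : PySem.Dict Int Int × Int) v => (st.1.insert v st.2, st.2 + 1)) (acc, i0)).1).contains w = false := by
  induction ks generalizing acc i0 with
  | nil => exact hacc
  | cons v t ih =>
    simp only [List.foldl]
    refine ih _ _ (fun h => hw (List.mem_cons_of_mem _ h)) ?_
    rw [PySem.Dict.contains_insert]
    simp only [Bool.or_eq_false_iff]
    refine ⟨?_, hacc⟩
    simp only [beq_eq_false_iff_ne, ne_eq]
    exact fun e => hw (e ▸ List.mem_cons_self)

theorem pv_foldB_inner (ks : List Int) (acc : PySem.Dict Int Int) (i0 : Int)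
    (hfresh : ∀ v ∈ ks, acc.contains v = false) (hnd : ks.Nodup) :
    (ks.foldl (fun (st : PySem.Dict Int Int × Int) v => (st.1.insert v st.2, st.2 + 1)) (acc, i0)).1.items
      = acc.items ++ pvTag ks i0 ∧
    (ks.foldl (fun (st : PySem.Dict Int Int × Int) v => (st.1.insert v st.2, st.2 + 1)) (acc, i0)).2
      = i0 + ks.length := by
  induction ks generalizing acc i0 with
  | nil => simp [pvTag]
  | cons v t ih =>
    rcases List.nodup_cons.1 hnd with ⟨hv, hndt⟩
    simp only [List.foldl]
    have hfree : acc.contains v = false := hfresh v List.mem_cons_self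
    have hfresh' : ∀ w ∈ t, (acc.insert v i0).contains w = false := by
      intro w hwt
      rw [PySem.Dict.contains_insert]
      simp only [Bool.or_eq_false_iff]
      refine ⟨?_, hfresh w (List.mem_cons_of_mem _ hwt)⟩
      simp only [beq_eq_false_iff_ne, ne_eq]
      exact fun e => hv (e ▸ hwt)
    obtain ⟨h1, h2⟩ := ih (acc.insert v i0) (i0 + 1) hfresh' hndt
    rw [h1, h2, PySem.Dict.items_insert_of_not_contains _ _ hfree]
    refine ⟨by simp [pvTag], ?_⟩
    simp only [List.length_cons]
    push_cast
    ring

theorem pv_foldB_outer (bget : Int → List Int) (fs : List Int)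
    (acc : PySem.Dict Int Int) (i0 : Int)
    (hnd : (fs.flatMap bget).Nodup)
    (hfresh : ∀ v ∈ fs.flatMap bget, acc.contains v = false) :
    ((fs.foldl (fun (st : PySem.Dict Int Int × Int) f =>
        (bget f).foldl (fun st v => (st.1.insert v st.2, st.2 + 1)) st) (acc, i0)).1).items
      = acc.items ++ pvTag (fs.flatMap bget) i0 := by
  induction fs generalizing acc i0 with
  | nil => simp [pvTag]
  | cons f rest ih =>
    simp only [List.flatMap_cons] at hnd hfresh
    have hnd1 : (bget f).Nodup := hnd.of_append_left
    have hnd2 : (rest.flatMap bget).Nodup := hnd.of_append_right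
    have hdisj := List.disjoint_of_nodup_append hnd
    have hfresh1 : ∀ v ∈ bget f, acc.contains v = false :=
      fun v hv => hfresh v (List.mem_append.2 (Or.inl hv))
    obtain ⟨hin1, hin2⟩ := pv_foldB_inner (bget f) acc i0 hfresh1 hnd1
    simp only [List.foldl]
    set st1 := (bget f).foldl (fun (st : PySem.Dict Int Int × Int) v => (st.1.insert v st.2, st.2 + 1)) (acc, i0) with hst1
    have hfresh2 : ∀ v ∈ rest.flatMap bget, st1.1.contains v = false := by
      intro v hv
      exact pv_foldB_contains _ _ _ _ (fun h => (hdisj h hv))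
        (hfresh v (List.mem_append.2 (Or.inr hv)))
    have := ih st1.1 st1.2 hnd2 hfresh2
    rw [show st1 = (st1.1, st1.2) from rfl] at this ⊢
    rw [this, hin1, hin2, List.flatMap_cons, pvTag_append]
    simp


-- bridge: the descending-frequency flatMap over the buckets is pvBuck, projected to keys
theorem pv_range_flatMap (cnt : Int → Int) (V : List Int) (m : Nat) :
    (PySem.List.pyRange (m : Int) 0 (-1)).flatMap (fun f => V.filter (fun v => cnt v == f))
      = (pvBuck m (V.map (fun k => (k, cnt k)))).map (·.1) := by
  induction m with
  | zero => simp [pvBuck, PySem.List.pyRange_neg_one_eq_nil]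
  | succ m ih =>
    have h0 : (0 : Int) < ((m + 1 : Nat) : Int) := by push_cast; omega
    rw [PySem.List.pyRange_neg_one_cons h0, List.flatMap_cons]
    simp only [pvBuck, List.map_append]
    rw [show ((m + 1 : Nat) : Int) - 1 = (m : Int) by push_cast; ring, ih]
    congr 1
    rw [List.filter_map]
    simp only [List.map_map]
    have h1 : ((fun (x : Int × Int) => x.1) ∘ fun k => (k, cnt k)) = id := rfl
    rw [h1, List.map_id]
    apply List.filter_congr
    intro v hv
    simp only [Function.comp_apply]
    rw [Bool.eq_iff_iff]
    simp only [beq_iff_eq]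
    push_cast
    omega

theorem pv_main : ∀ (rank : List Int), Dom_calculateNewMapBetweenAtomsAndTypes_py rank →
    calculateNewMapBetweenAtomsAndTypes_py rank = calculateNewMapBetweenAtomsAndTypes_py_alt rank := by
  intro rank hdom
  by_cases hr : rank = []
  · subst hr; decide
  · have hdom' : ∀ k ∈ rank, -2147483648 ≤ k ∧ k ≤ 2147483648 := by
      intro k hk
      have := (List.all_eq_true.1 hdom) k hk
      simpa [pvDomInt] using this
    -- abbreviations
    set sortedRank := PySem.List.sorted rank (fun x => x) false with hsr
    set V := PySem.Set.ofList sortedRank with hV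
    set cnt : Int → Int := fun v => ((rank.count v : Nat) : Int) with hcnt
    have hmemV : ∀ k, k ∈ V ↔ k ∈ rank := by
      intro k
      rw [hV, PySem.Set.mem_ofList, hsr, PySem.List.mem_sorted]
    have hVlt : V.Pairwise (· < ·) := pv_ofList_sorted_lt rank
    have hVnd : V.Nodup := PySem.Set.nodup_ofList _
    -- the counter items list
    have hitems : (PySem.Dict.counter sortedRank).items = V.map (fun k => (k, cnt k)) := by
      rw [PySem.Dict.items_counter]
      apply List.map_congr_left
      intro k hk
      simp only [hcnt, Prod.mk.injEq, true_and]
      congr 1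
      exact ((PySem.List.sorted_perm rank (fun x => x) false).count_eq k)
    set L := V.map (fun k => (k, cnt k)) with hLdef
    have hL : L.Pairwise (fun p q => p.1 < q.1) := by
      rw [hLdef, List.pairwise_map]
      exact hVlt
    have hb : ∀ p ∈ L, -2147483648 ≤ p.1 ∧ p.1 ≤ 2147483648 := by
      intro p hp
      rw [hLdef] at hp
      obtain ⟨k, hk, rfl⟩ := List.mem_map.1 hp
      exact hdom' k ((hmemV k).1 hk)
    -- counts of B
    have hkeys : (PySem.Dict.counter rank).keys = PySem.Set.ofList rank := PySem.Dict.keys_counter rank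
    have hvals : (PySem.Dict.counter rank).values = (PySem.Set.ofList rank).map cnt := by
      show ((PySem.Dict.counter rank).items).map (·.2) = _
      rw [PySem.Dict.items_counter]
      simp [hcnt]
    -- maxc exists
    obtain ⟨x0, hx0⟩ := List.exists_mem_of_ne_nil rank hr
    have hx0V : x0 ∈ PySem.Set.ofList rank := (PySem.Set.mem_ofList _ _).2 hx0
    obtain ⟨maxc, hmax⟩ : ∃ m, PySem.List.max? (PySem.Dict.counter rank).values (fun x => x) = some m := by
      cases hmx : PySem.List.max? (PySem.Dict.counter rank).values (fun x => x) with
      | none =>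
        have := (PySem.List.max?_eq_none_iff _ _).1 hmx
        rw [hvals] at this
        rw [List.map_eq_nil_iff] at this
        rw [this] at hx0V
        cases hx0V
      | some m => exact ⟨m, rfl⟩
    have hmaxmem := PySem.List.max?_mem hmax
    have hmaxle := PySem.List.max?_isMax hmax
    rw [hvals] at hmaxmem hmaxle
    obtain ⟨k0, hk0, hk0e⟩ := List.mem_map.1 hmaxmem
    have hmax1 : 1 ≤ maxc := by
      have h1 : 0 < rank.count k0 := List.count_pos_iff.2 ((PySem.Set.mem_ofList _ _).1 hk0)
      have h2 : cnt k0 = maxc := hk0e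
      simp only [hcnt] at h2
      omega
    have hc : ∀ p ∈ L, 1 ≤ p.2 ∧ p.2 ≤ ((maxc.toNat : Nat) : Int) := by
      intro p hp
      rw [hLdef] at hp
      obtain ⟨k, hk, rfl⟩ := List.mem_map.1 hp
      have hkr : k ∈ rank := (hmemV k).1 hk
      constructor
      · simp only [hcnt]
        have : 0 < rank.count k := List.count_pos_iff.2 hkr
        omega
      · have : cnt k ≤ maxc := by
          apply hmaxle
          exact List.mem_map_of_mem ((PySem.Set.mem_ofList _ _).2 hkr)
        omega
    -- ===== evaluate A =====
    have hA : calculateNewMapBetweenAtomsAndTypes_py rank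
        = pvTag ((pvSel L.length L).map (·.1)) 0 := by
      show (((PySem.List.pyRange 0 ((PySem.Dict.counter sortedRank).size : Int) 1).foldl
        (fun (st : PySem.Dict Int Int × PySem.Dict Int Int) i =>
          match PySem.List.max? st.2.items (fun p => p.2) with
          | some m => (st.1.insert m.1 i, st.2.erase m.1)
          | none => st)
        (PySem.Dict.empty, PySem.Dict.counter sortedRank)).1).items = _
      have hsz : ((PySem.Dict.counter sortedRank).size : Int)
          = 0 + ((PySem.Dict.counter sortedRank).items.length : Int) := by
        simp [PySem.Dict.size]
      rw [hsz, pv_foldA _ 0 _ _ (fun p _ => PySem.Dict.contains_empty _)]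
      rw [hitems]
      simp [PySem.Dict.empty]
    -- ===== evaluate B =====
    -- the bucket lookup
    have hsortkeys : PySem.List.sorted (PySem.Dict.counter rank).keys (fun x => x) false = V := by
      rw [hkeys, hV, hsr]
      exact pv_values_eq rank
    have hbget : ∀ c, ((V.foldl
        (fun (b : PySem.Dict Int (List Int)) v =>
          b.modify ((PySem.Dict.counter rank).getD v 0) [] (· ++ [v]))
        PySem.Dict.empty).getD c [])
        = V.filter (fun v => cnt v == c) := by
      intro c
      have : (V.foldl (fun (b : PySem.Dict Int (List Int)) v =>
          b.modify ((PySem.Dict.counter rank).getD v 0) [] (· ++ [v])) PySem.Dict.empty)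
          = ((V.map (fun v => (((PySem.Dict.counter rank).getD v 0 : Int), (v : Int)))).foldl
            (fun (b : PySem.Dict Int (List Int)) p => b.modify p.1 [] (· ++ [p.2])) PySem.Dict.empty) := by
        rw [List.foldl_map]
      rw [this, PySem.Dict.getD_foldl_modify_append]
      rw [List.filter_map]
      simp only [List.map_map, PySem.Dict.getD_empty, List.nil_append]
      have h2 : V.filter ((fun (p : Int × Int) => p.1 == c) ∘ (fun v => (((PySem.Dict.counter rank).getD v 0 : Int), (v : Int))))
          = V.filter (fun v => cnt v == c) := by
        apply List.filter_congr
        intro v hv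
        simp only [Function.comp_apply, PySem.Dict.getD_counter, hcnt]
      rw [h2]
      have h3 : ((fun (x : Int × Int) => x.2) ∘ (fun v => (((PySem.Dict.counter rank).getD v 0 : Int), (v : Int)))) = id := rfl
      rw [h3, List.map_id]
    -- Nodup of the concatenated buckets
    have hnd : ((PySem.List.pyRange maxc 0 (-1)).flatMap (fun f => V.filter (fun v => cnt v == f))).Nodup := by
      rw [List.nodup_flatMap]
      constructor
      · exact fun f _ => hVnd.filter _
      · have hfs : (PySem.List.pyRange maxc 0 (-1)).Nodup := by
          rw [PySem.List.pyRange_neg_one_eq_reverse, List.nodup_reverse]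
          exact PySem.List.nodup_pyRange_one _ _
        refine hfs.imp ?_
        intro f g hfg v hvf hvg
        have h1 := List.of_mem_filter hvf
        have h2 := List.of_mem_filter hvg
        simp only [beq_iff_eq] at h1 h2
        exact hfg (h1 ▸ h2)
    have hB : calculateNewMapBetweenAtomsAndTypes_py_alt rank
        = pvTag ((PySem.List.pyRange maxc 0 (-1)).flatMap (fun f => V.filter (fun v => cnt v == f))) 0 := by
      simp only [calculateNewMapBetweenAtomsAndTypes_py_alt, if_neg hr, hmax, hsortkeys, hbget]
      rw [pv_foldB_outer (fun f => V.filter (fun v => cnt v == f)) (PySem.List.pyRange maxc 0 (-1))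
        PySem.Dict.empty 0 hnd (fun v _ => PySem.Dict.contains_empty _)]
      simp [PySem.Dict.empty]
    have hcast : ((maxc.toNat : Nat) : Int) = maxc := Int.toNat_of_nonneg (by omega)
    rw [hA, hB, ← hcast, pv_range_flatMap cnt V maxc.toNat, ← hLdef,
      pvSel_eq_pvBuck maxc.toNat L hL hb hc]

-- ===== VERDICT (by name: the statement is the Claim_ definition above) =====
theorem calculateNewMapBetweenAtomsAndTypes_py_spec : Claim_equal_calculateNewMapBetweenAtomsAndTypes_py := by
  intro rank hdom
  unfold Spec_calculateNewMapBetweenAtomsAndTypes_py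
  exact pv_main rank hdom
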